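-- pv_equiv track=rewrite | github.com/ntimalsi/neural_network_dice_input_trainer | program.py | generateposition
-- ===== SOURCE A (Python) =====
-- def generateposition(generator_number, dice_width = 5, dice_length = 5):
--     all_combinations = []
--     #array = set()
--     #start = 0
--     if generator_number == 1:
--         for i in range(5):
--             for j in range(5):
--                 row = []
--                 column = []
--                 row.extend([i])
--                 column.extend([j])
--                 all_combinations.append((row, column))
--
--     if generator_number == 2:
--         for i in range(3):
--             for j in range(3):
--                 row = []
--                 column = []
--                 first_pixel = (i,j)
--                 second_pixel = (first_pixel[0]+2, first_pixel[1]+2)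
--                 row.extend([first_pixel[0], second_pixel[0]])
--                 column.extend([first_pixel[1], second_pixel[1]])
--                 all_combinations.append((row, column))
--
--     if generator_number == 3:
--         for i in range(3):
--             for j in range(3):
--                 row = []
--                 column = []
--                 first_pixel = (i,j)
--                 second_pixel = (first_pixel[0]+1, first_pixel[1]+1)
--                 third_pixel = (first_pixel[0]+2, first_pixel[1]+2)
--                 row.extend([first_pixel[0], second_pixel[0], third_pixel[0]])
--                 column.extend([first_pixel[1], second_pixel[1], third_pixel[1]])
--                 all_combinations.append((row, column))
--
--     if generator_number == 4:
--         for i in range(3):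
--             for j in range(3):
--                 row = []
--                 column = []
--                 first_pixel = (i,j)
--                 second_pixel = (first_pixel[0], first_pixel[1]+2)
--                 third_pixel = (first_pixel[0]+2, first_pixel[1])
--                 forth_pixel = (first_pixel[0]+2, first_pixel[1]+2)
--                 row.extend([first_pixel[0], second_pixel[0], third_pixel[0], forth_pixel[0]])
--                 column.extend([first_pixel[1], second_pixel[1], third_pixel[1], forth_pixel[1]])
--                 all_combinations.append((row, column))
--
--     if generator_number == 5:
--         for i in range(3):
--             for j in range(3):
--                 row = []
--                 column = []
--                 first_pixel = (i,j)
--                 second_pixel = (first_pixel[0], first_pixel[1]+2)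
--                 third_pixel = (first_pixel[0]+1, first_pixel[1]+1)
--                 forth_pixel = (first_pixel[0]+2, first_pixel[1])
--                 fifth_pixel = (first_pixel[0]+2, first_pixel[1]+2)
--                 row.extend([first_pixel[0], second_pixel[0], third_pixel[0], forth_pixel[0], fifth_pixel[0]])
--                 column.extend([first_pixel[1], second_pixel[1], third_pixel[1], forth_pixel[1], fifth_pixel[1]])
--                 all_combinations.append((row, column))
--
--     if generator_number == 6:
--         for i in range(3):
--             for j in range(3):
--                 row = []
--                 column = []
--                 first_pixel = (i,j)
--                 second_pixel = (first_pixel[0], first_pixel[1]+2)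
--                 third_pixel = (first_pixel[0]+1, first_pixel[1])
--                 forth_pixel = (first_pixel[0]+1, first_pixel[1]+2)
--                 fifth_pixel = (first_pixel[0]+2, first_pixel[1])
--                 sixth_pixel = (first_pixel[0]+2, first_pixel[1]+2)
--                 row.extend([first_pixel[0], second_pixel[0], third_pixel[0], forth_pixel[0], fifth_pixel[0], sixth_pixel[0]])
--                 column.extend([first_pixel[1], second_pixel[1], third_pixel[1], forth_pixel[1], fifth_pixel[1], sixth_pixel[1]])
--                 all_combinations.append((row, column))
--
--     return all_combinations
-- ===== SOURCE B (Python) =====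
-- def generateposition(generator_number, dice_width=5, dice_length=5):
--     # Derive the pip offsets from the standard dice-face rule instead of
--     # hardcoded branches, and build the result as a Cartesian product of
--     # per-axis lists (rows depend only on i, columns only on j).
--     if generator_number == 1:
--         rows = [[i] for i in range(5)]
--         cols = [[j] for j in range(5)]
--     elif 2 <= generator_number <= 6:
--         n = generator_number
--         offs = [(r, c) for r in range(3) for c in range(3)
--                 if ((r, c) in ((0, 0), (2, 2)) and n >= 2)
--                 or ((r, c) in ((0, 2), (2, 0)) and n >= 4)
--                 or ((r, c) in ((1, 0), (1, 2)) and n >= 6)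
--                 or ((r, c) == (1, 1) and n % 2 == 1)]
--         rows = [[i + r for r, _ in offs] for i in range(3)]
--         cols = [[j + c for _, c in offs] for j in range(3)]
--     else:
--         return []
--     return [(row, col) for row in rows for col in cols]
-- ===== Notes on version B (the rewrite author's own statement) =====
-- stated objective: alternative
-- what changed: B derives the pip offsets arithmetically from the standard dice-face rule (corner/edge/center thresholds on the pip count) instead of six hardcoded branches, and builds the result as a Cartesian product of precomputed per-axis row-lists and column-lists rather than constructing each cell inside a nested loop.
import Mathlib
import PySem

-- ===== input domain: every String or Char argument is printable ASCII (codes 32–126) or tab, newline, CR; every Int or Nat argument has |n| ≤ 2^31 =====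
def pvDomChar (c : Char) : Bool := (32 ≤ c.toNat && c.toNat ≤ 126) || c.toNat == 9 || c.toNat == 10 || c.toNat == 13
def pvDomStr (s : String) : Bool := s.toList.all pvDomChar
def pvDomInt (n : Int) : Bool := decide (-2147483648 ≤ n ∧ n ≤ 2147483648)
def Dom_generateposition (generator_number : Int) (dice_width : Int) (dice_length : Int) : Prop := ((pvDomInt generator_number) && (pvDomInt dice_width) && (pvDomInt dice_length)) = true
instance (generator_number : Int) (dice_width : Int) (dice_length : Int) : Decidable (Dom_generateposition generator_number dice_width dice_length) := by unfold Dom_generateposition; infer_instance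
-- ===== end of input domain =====

-- B derives pip offsets from the dice-face rule and builds the output as a Cartesian product of per-axis lists instead of six hardcoded nested loops; objective: alternative.


-- ===== PORT A =====
def generateposition (generator_number : Int) (dice_width : Int) (dice_length : Int) : List (List Int × List Int) :=
  let all_combinations : List (List Int × List Int) := []
  let all_combinations :=
    if generator_number == 1 then
      (PySem.List.pyRange 0 5 1).foldl (fun acc i =>
        (PySem.List.pyRange 0 5 1).foldl (fun acc j =>
          let row : List Int := [] ++ [i]
          let column : List Int := [] ++ [j]
          acc ++ [(row, column)]) acc) all_combinations
    else all_combinations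
  let all_combinations :=
    if generator_number == 2 then
      (PySem.List.pyRange 0 3 1).foldl (fun acc i =>
        (PySem.List.pyRange 0 3 1).foldl (fun acc j =>
          let first_pixel := (i, j)
          let second_pixel := (first_pixel.1 + 2, first_pixel.2 + 2)
          let row : List Int := [] ++ [first_pixel.1, second_pixel.1]
          let column : List Int := [] ++ [first_pixel.2, second_pixel.2]
          acc ++ [(row, column)]) acc) all_combinations
    else all_combinations
  let all_combinations :=
    if generator_number == 3 then
      (PySem.List.pyRange 0 3 1).foldl (fun acc i =>
        (PySem.List.pyRange 0 3 1).foldl (fun acc j =>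
          let first_pixel := (i, j)
          let second_pixel := (first_pixel.1 + 1, first_pixel.2 + 1)
          let third_pixel := (first_pixel.1 + 2, first_pixel.2 + 2)
          let row : List Int := [] ++ [first_pixel.1, second_pixel.1, third_pixel.1]
          let column : List Int := [] ++ [first_pixel.2, second_pixel.2, third_pixel.2]
          acc ++ [(row, column)]) acc) all_combinations
    else all_combinations
  let all_combinations :=
    if generator_number == 4 then
      (PySem.List.pyRange 0 3 1).foldl (fun acc i =>
        (PySem.List.pyRange 0 3 1).foldl (fun acc j =>
          let first_pixel := (i, j)
          let second_pixel := (first_pixel.1, first_pixel.2 + 2)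
          let third_pixel := (first_pixel.1 + 2, first_pixel.2)
          let forth_pixel := (first_pixel.1 + 2, first_pixel.2 + 2)
          let row : List Int := [] ++ [first_pixel.1, second_pixel.1, third_pixel.1, forth_pixel.1]
          let column : List Int := [] ++ [first_pixel.2, second_pixel.2, third_pixel.2, forth_pixel.2]
          acc ++ [(row, column)]) acc) all_combinations
    else all_combinations
  let all_combinations :=
    if generator_number == 5 then
      (PySem.List.pyRange 0 3 1).foldl (fun acc i =>
        (PySem.List.pyRange 0 3 1).foldl (fun acc j =>
          let first_pixel := (i, j)
          let second_pixel := (first_pixel.1, first_pixel.2 + 2)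
          let third_pixel := (first_pixel.1 + 1, first_pixel.2 + 1)
          let forth_pixel := (first_pixel.1 + 2, first_pixel.2)
          let fifth_pixel := (first_pixel.1 + 2, first_pixel.2 + 2)
          let row : List Int := [] ++ [first_pixel.1, second_pixel.1, third_pixel.1, forth_pixel.1, fifth_pixel.1]
          let column : List Int := [] ++ [first_pixel.2, second_pixel.2, third_pixel.2, forth_pixel.2, fifth_pixel.2]
          acc ++ [(row, column)]) acc) all_combinations
    else all_combinations
  let all_combinations :=
    if generator_number == 6 then
      (PySem.List.pyRange 0 3 1).foldl (fun acc i =>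
        (PySem.List.pyRange 0 3 1).foldl (fun acc j =>
          let first_pixel := (i, j)
          let second_pixel := (first_pixel.1, first_pixel.2 + 2)
          let third_pixel := (first_pixel.1 + 1, first_pixel.2)
          let forth_pixel := (first_pixel.1 + 1, first_pixel.2 + 2)
          let fifth_pixel := (first_pixel.1 + 2, first_pixel.2)
          let sixth_pixel := (first_pixel.1 + 2, first_pixel.2 + 2)
          let row : List Int := [] ++ [first_pixel.1, second_pixel.1, third_pixel.1, forth_pixel.1, fifth_pixel.1, sixth_pixel.1]
          let column : List Int := [] ++ [first_pixel.2, second_pixel.2, third_pixel.2, forth_pixel.2, fifth_pixel.2, sixth_pixel.2]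
          acc ++ [(row, column)]) acc) all_combinations
    else all_combinations
  all_combinations

-- ===== PORT B =====
-- pip membership by the standard dice-face rule: diagonal corners from 2 pips,
-- the other corners from 4, the mid-edges from 6, the centre for odd counts
def pvIsPip (n r c : Int) : Bool :=
  (((r == 0 && c == 0) || (r == 2 && c == 2)) && n ≥ 2)
  || (((r == 0 && c == 2) || (r == 2 && c == 0)) && n ≥ 4)
  || (((r == 1 && c == 0) || (r == 1 && c == 2)) && n ≥ 6)
  || ((r == 1 && c == 1) && n % 2 == 1)

def generateposition_alt (generator_number : Int) (dice_width : Int) (dice_length : Int) : List (List Int × List Int) :=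
  if generator_number == 1 then
    let rows := (PySem.List.pyRange 0 5 1).map (fun i => [i])
    let cols := (PySem.List.pyRange 0 5 1).map (fun j => [j])
    rows.flatMap (fun row => cols.map (fun col => (row, col)))
  else if 2 ≤ generator_number ∧ generator_number ≤ 6 then
    let offs := (PySem.List.pyRange 0 3 1).flatMap (fun r =>
      (PySem.List.pyRange 0 3 1).filterMap (fun c =>
        if pvIsPip generator_number r c then some (r, c) else none))
    let rows := (PySem.List.pyRange 0 3 1).map (fun i => offs.map (fun p => i + p.1))
    let cols := (PySem.List.pyRange 0 3 1).map (fun j => offs.map (fun p => j + p.2))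
    rows.flatMap (fun row => cols.map (fun col => (row, col)))
  else []

-- ===== PRECONDITION & SPEC =====
def Spec_generateposition (generator_number : Int) (dice_width : Int) (dice_length : Int) (out : List (List Int × List Int)) : Prop := out = generateposition_alt generator_number dice_width dice_length
instance (generator_number : Int) (dice_width : Int) (dice_length : Int) (out : List (List Int × List Int)) : Decidable (Spec_generateposition generator_number dice_width dice_length out) := by unfold Spec_generateposition; infer_instance

-- ===== CLAIM (what is proved, stated in full; the proofs are below) =====
def Claim_equal_generateposition : Prop := ∀ (generator_number : Int) (dice_width : Int) (dice_length : Int), Dom_generateposition generator_number dice_width dice_length → Spec_generateposition generator_number dice_width dice_length (generateposition generator_number dice_width dice_length)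

-- ===== LEMMAS AND PROOFS =====
theorem generateposition_eq_alt (g w l : Int) : generateposition g w l = generateposition_alt g w l := by
  by_cases h1 : g = 1
  · subst h1; rfl
  · by_cases h2 : g = 2
    · subst h2; rfl
    · by_cases h3 : g = 3
      · subst h3; rfl
      · by_cases h4 : g = 4
        · subst h4; rfl
        · by_cases h5 : g = 5
          · subst h5; rfl
          · by_cases h6 : g = 6
            · subst h6; rfl
            · have hB : ¬(2 ≤ g ∧ g ≤ 6) := by omega
              simp [generateposition, generateposition_alt, h1, h2, h3, h4, h5, h6, hB]

-- ===== VERDICT (by name: the statement is the Claim_ definition above) =====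
theorem generateposition_spec : Claim_equal_generateposition := by
  intro g w l _
  exact generateposition_eq_alt g w l
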